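-- pv_equiv track=rewrite | github.com/onap/archived-optf-has | conductor/conductor/data/service.py | get_candidate_discard_set
-- ===== SOURCE A (Python) =====
-- def get_candidate_discard_set(value, candidate_list, value_attrib):
--     discard_set = set()
--     value_dict = value
--     value_condition = ''
--     value_list = None
--     if value_dict:
--         if "all" in value_dict:
--             value_list = value_dict.get("all")
--             value_condition = "all"
--         elif "any" in value_dict:
--             value_list = value_dict.get("any")
--             value_condition = "any"
--
--         if not value_list:
--             return discard_set
--
--         for candidate in candidate_list:
--             c_any = False
--             c_all = True
--             for value in value_list:
--                 if candidate.get(value_attrib) == value: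
--                     c_any = True  # include if any one is met
--                 elif candidate.get(value_attrib) != value:
--                     c_all = False  # discard even if one is not met
--             if value_condition == 'any' and not c_any:
--                 discard_set.add(candidate.get("candidate_id"))
--             elif value_condition == 'all' and not c_all:
--                 discard_set.add(candidate.get("candidate_id"))
--     return discard_set
-- ===== SOURCE B (Python) =====
-- def get_candidate_discard_set(value, candidate_list, value_attrib):
--     empty = set()
--     if not value:
--         return empty
--     if "all" in value:
--         value_list = value["all"]
--         cond_all = True
--     elif "any" in value:
--         value_list = value["any"]
--         cond_all = False
--     else:
--         return empty
--     if not value_list: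
--         return empty
--     distinct = set(value_list)
--     if cond_all:
--         if len(distinct) > 1:
--             # no candidate can equal two different values at once
--             return {c.get("candidate_id") for c in candidate_list}
--         (v,) = distinct
--         return {c.get("candidate_id") for c in candidate_list
--                 if c.get(value_attrib) != v}
--     return {c.get("candidate_id") for c in candidate_list
--             if c.get(value_attrib) not in distinct}
-- ===== Notes on version B (the rewrite author's own statement) =====
-- stated objective: alternative
-- what changed: B precomputes the distinct requested values once (set(value_list)) and decides each candidate by a single membership test ('any') or a closed-form single-value comparison / discard-all rule ('all'), replacing A's per-candidate inner scan of value_list.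
-- outside the precondition, e.g. on get_candidate_discard_set({'any': ['x']}, [{}], 'a'): A returns {None}, B returns {None}
import Mathlib
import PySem

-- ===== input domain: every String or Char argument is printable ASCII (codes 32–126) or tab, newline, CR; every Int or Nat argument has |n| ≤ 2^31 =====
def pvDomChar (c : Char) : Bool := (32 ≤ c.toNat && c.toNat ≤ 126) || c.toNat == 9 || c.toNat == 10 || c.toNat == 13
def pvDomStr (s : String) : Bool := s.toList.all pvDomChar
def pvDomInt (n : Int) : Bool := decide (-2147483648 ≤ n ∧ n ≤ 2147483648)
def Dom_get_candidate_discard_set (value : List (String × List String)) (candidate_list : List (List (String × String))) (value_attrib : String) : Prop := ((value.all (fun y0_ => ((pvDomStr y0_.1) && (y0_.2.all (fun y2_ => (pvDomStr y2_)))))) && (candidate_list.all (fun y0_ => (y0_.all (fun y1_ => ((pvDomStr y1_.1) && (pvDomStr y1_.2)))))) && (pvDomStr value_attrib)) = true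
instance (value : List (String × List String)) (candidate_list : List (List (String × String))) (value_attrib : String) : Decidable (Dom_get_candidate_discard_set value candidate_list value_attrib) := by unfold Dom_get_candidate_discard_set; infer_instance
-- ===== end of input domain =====

-- B replaces A's inner scan of value_list per candidate by a precomputed set of the distinct
-- requested values and a closed-form 'all' case (objective: alternative decomposition; not
-- measurably faster on the timed inputs). Neither program mutates its arguments.

-- ===== PORT A =====
-- candidate.get(k) on a candidate dict (shared lookup helper; both Pythons call c.get)
def pvCGet (c : List (String × String)) (k : String) : Option String :=
  (PySem.Dict.mk c).get? k

def get_candidate_discard_set (value : List (String × List String)) (candidate_list : List (List (String × String))) (value_attrib : String) : List String :=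
  let discard0 : PySem.Set String := PySem.Set.empty
  if value = [] then discard0
  else
    let vd := PySem.Dict.mk value
    -- resolve value_list / value_condition exactly as A's if/elif does
    let vl_cond : List String × String :=
      if vd.contains "all" then ((vd.get? "all").getD [], "all")
      else if vd.contains "any" then ((vd.get? "any").getD [], "any")
      else ([], "")
    if vl_cond.1 = [] then discard0          -- 'if not value_list: return discard_set'
    else
      candidate_list.foldl (fun discard_set candidate =>
        -- inner loop over value_list maintaining (c_any, c_all)
        let cc := vl_cond.1.foldl
          (fun (p : Bool × Bool) v =>
            if pvCGet candidate value_attrib == some v then (true, p.2) else (p.1, false))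
          (false, true)
        if vl_cond.2 == "any" && !cc.1 then
          PySem.Set.add discard_set ((pvCGet candidate "candidate_id").getD "")
        else if vl_cond.2 == "all" && !cc.2 then
          PySem.Set.add discard_set ((pvCGet candidate "candidate_id").getD "")
        else discard_set) discard0

-- ===== PORT B =====
-- the id a candidate contributes to the discard set
def pvIdOf (c : List (String × String)) : String :=
  (pvCGet c "candidate_id").getD ""

-- shared tail of Source B after value_list/cond_all are resolved
def pvAltGo (candidate_list : List (List (String × String))) (value_attrib : String)
    (value_list : List String) (cond_all : Bool) : List String :=
  if value_list = [] then PySem.Set.empty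
  else
    let distinct : PySem.Set String := PySem.Set.ofList value_list
    if cond_all then
      if 1 < distinct.length then
        -- no candidate can equal two different values at once: discard every id
        PySem.Set.ofList (candidate_list.map pvIdOf)
      else
        match distinct with
        | v :: _ =>
          PySem.Set.ofList
            ((candidate_list.filter (fun c => !(pvCGet c value_attrib == some v))).map pvIdOf)
        | [] => PySem.Set.empty   -- unreachable: distinct of a nonempty list is nonempty
    else
      PySem.Set.ofList
        ((candidate_list.filter (fun c =>
            !(match pvCGet c value_attrib with
              | some s => PySem.Set.contains distinct s
              | none => false))).map pvIdOf)

def get_candidate_discard_set_alt (value : List (String × List String)) (candidate_list : List (List (String × String))) (value_attrib : String) : List String :=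
  if value = [] then PySem.Set.empty
  else
    let vd := PySem.Dict.mk value
    if vd.contains "all" then pvAltGo candidate_list value_attrib ((vd.get? "all").getD []) true
    else if vd.contains "any" then pvAltGo candidate_list value_attrib ((vd.get? "any").getD []) false
    else PySem.Set.empty

-- ===== PRECONDITION & SPEC =====
-- Pre_ excludes inputs where some candidate lacks the "candidate_id" key while discarding is
-- active: there Python's set may contain None, which is not a value of the declared List String
-- type (both Pythons return that same None-containing set).
def Pre_get_candidate_discard_set (value : List (String × List String)) (candidate_list : List (List (String × String))) (value_attrib : String) : Prop :=
  (let vd := PySem.Dict.mk value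
   (if vd.contains "all" then (vd.get? "all").getD []
    else if vd.contains "any" then (vd.get? "any").getD []
    else []) = [])
  ∨ ∀ c ∈ candidate_list, (pvCGet c "candidate_id").isSome
instance (value : List (String × List String)) (candidate_list : List (List (String × String))) (value_attrib : String) : Decidable (Pre_get_candidate_discard_set value candidate_list value_attrib) := by unfold Pre_get_candidate_discard_set; infer_instance

def pvWitness_get_candidate_discard_set : (List (String × List String)) × (List (List (String × String))) × String :=
  ([("any", ["x", "y"])],
   [[("candidate_id", "c1"), ("a", "x")], [("candidate_id", "c2"), ("a", "z")]],
   "a")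

def Spec_get_candidate_discard_set (value : List (String × List String)) (candidate_list : List (List (String × String))) (value_attrib : String) (out : List String) : Prop := out = get_candidate_discard_set_alt value candidate_list value_attrib
instance (value : List (String × List String)) (candidate_list : List (List (String × String))) (value_attrib : String) (out : List String) : Decidable (Spec_get_candidate_discard_set value candidate_list value_attrib out) := by unfold Spec_get_candidate_discard_set; infer_instance

-- ===== CLAIM (what is proved, stated in full; the proofs are below) =====
def Claim_equal_get_candidate_discard_set : Prop := ∀ (value : List (String × List String)) (candidate_list : List (List (String × String))) (value_attrib : String), Dom_get_candidate_discard_set value candidate_list value_attrib → Pre_get_candidate_discard_set value candidate_list value_attrib → Spec_get_candidate_discard_set value candidate_list value_attrib (get_candidate_discard_set value candidate_list value_attrib)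

-- ===== LEMMAS AND PROOFS =====

-- the witness satisfies Dom and Pre
theorem pvWitness_ok :
    Dom_get_candidate_discard_set pvWitness_get_candidate_discard_set.1 pvWitness_get_candidate_discard_set.2.1 pvWitness_get_candidate_discard_set.2.2 ∧
    Pre_get_candidate_discard_set pvWitness_get_candidate_discard_set.1 pvWitness_get_candidate_discard_set.2.1 pvWitness_get_candidate_discard_set.2.2 := by
  decide

-- A's inner loop computes (any-match, all-match) of value_list against g
theorem pv_inner_loop (g : Option String) (vl : List String) (a b : Bool) :
    vl.foldl (fun (p : Bool × Bool) v =>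
        if g == some v then (true, p.2) else (p.1, false)) (a, b)
      = (a || vl.any (fun v => g == some v), b && vl.all (fun v => g == some v)) := by
  induction vl generalizing a b with
  | nil => simp
  | cons v t ih =>
    by_cases h : (g == some v) = true
    · rw [List.foldl_cons, if_pos h, ih, List.any_cons, List.all_cons, h]; simp
    · rw [List.foldl_cons, if_neg h, ih, List.any_cons, List.all_cons,
        Bool.eq_false_iff.mpr h]; simp

-- a foldl that conditionally adds f c equals building the set of the filtered, mapped list
theorem pv_foldl_add_filter {α : Type} (q : α → Bool) (f : α → String)
    (l : List α) (s : PySem.Set String) :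
    l.foldl (fun s c => if q c then PySem.Set.add s (f c) else s) s
      = ((l.filter q).map f).foldl PySem.Set.add s := by
  induction l generalizing s with
  | nil => rfl
  | cons c t ih =>
    by_cases h : q c <;> simp [h, ih]

theorem pv_ofList_singleton_all {v : String} {vl : List String} (p : String → Bool)
    (h1 : PySem.Set.ofList vl = [v]) :
    vl.all p = p v := by
  have hv : v ∈ vl := (PySem.Set.mem_ofList vl v).mp (by rw [h1]; simp)
  have hall : ∀ w ∈ vl, w = v := by
    intro w hw
    have : w ∈ PySem.Set.ofList vl := (PySem.Set.mem_ofList vl w).mpr hw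
    rw [h1] at this; exact List.mem_singleton.mp this
  rw [Bool.eq_iff_iff]
  simp only [List.all_eq_true]
  exact ⟨fun h => h v hv, fun h w hw => (hall w hw) ▸ h⟩

theorem pv_two_distinct {vl : List String}
    (h : 1 < (PySem.Set.ofList vl).length) (g : Option String) :
    vl.all (fun v => g == some v) = false := by
  obtain ⟨v, w, rest, hd⟩ : ∃ v w rest, PySem.Set.ofList vl = v :: w :: rest := by
    rcases hs : PySem.Set.ofList vl with _ | ⟨v, _ | ⟨w, rest⟩⟩ <;> simp [hs] at h ⊢
  have hnd : (PySem.Set.ofList vl).Nodup := PySem.Set.nodup_ofList vl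
  rw [hd] at hnd
  have hvw : v ≠ w := by
    intro hvw; exact (List.nodup_cons.mp hnd).1 (hvw ▸ List.mem_cons_self ..)
  have hv : v ∈ vl := (PySem.Set.mem_ofList vl v).mp (by rw [hd]; simp)
  have hw : w ∈ vl := (PySem.Set.mem_ofList vl w).mp (by rw [hd]; simp)
  rw [Bool.eq_false_iff]
  intro hall
  rw [List.all_eq_true] at hall
  have h1 := hall v hv
  have h2 := hall w hw
  simp only [beq_iff_eq] at h1 h2
  exact hvw (by rw [h1] at h2; exact Option.some.inj h2)

-- the 'any' membership tests agree
theorem pv_any_pred (vl : List String) (g : Option String) :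
    vl.any (fun v => g == some v)
      = (match g with
         | some s => PySem.Set.contains (PySem.Set.ofList vl) s
         | none => false) := by
  cases g with
  | none => simp
  | some s =>
    rw [Bool.eq_iff_iff, List.any_eq_true, PySem.Set.contains_iff, PySem.Set.mem_ofList]
    constructor
    · rintro ⟨v, hv, he⟩
      rw [show s = v from by simpa using he]; exact hv
    · intro hs; exact ⟨s, hs, by simp⟩

-- main branch equality: A's candidate loop equals pvAltGo, for each resolved condition
theorem pv_branch (candidate_list : List (List (String × String))) (value_attrib : String)
    (vl : List String) (cond : String) (hc : cond = "all" ∨ cond = "any") :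
    (if vl = [] then (PySem.Set.empty : PySem.Set String)
     else candidate_list.foldl (fun discard_set candidate =>
        let cc := vl.foldl
          (fun (p : Bool × Bool) v =>
            if pvCGet candidate value_attrib == some v then (true, p.2) else (p.1, false))
          (false, true)
        if cond == "any" && !cc.1 then
          PySem.Set.add discard_set ((pvCGet candidate "candidate_id").getD "")
        else if cond == "all" && !cc.2 then
          PySem.Set.add discard_set ((pvCGet candidate "candidate_id").getD "")
        else discard_set) PySem.Set.empty)
      = pvAltGo candidate_list value_attrib vl (cond == "all") := by
  by_cases hvl : vl = []
  · simp [hvl, pvAltGo]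
  · rw [if_neg hvl]
    unfold pvAltGo
    rw [if_neg hvl]
    rcases hc with hc | hc <;> subst hc
    · -- condition 'all'
      simp only [show ("all" == "all") = true from rfl, if_pos]
      by_cases hlen : 1 < (PySem.Set.ofList vl).length
      · rw [if_pos hlen]
        rw [PySem.List.foldl_congr_mem _ _
          (fun s c => PySem.Set.add s (pvIdOf c)) _
          (by intro s c _
              rw [pv_inner_loop]
              simp [pv_two_distinct hlen, pvIdOf])]
        rw [PySem.Set.ofList_eq_foldl, List.foldl_map]
        rfl
      · rw [if_neg hlen]
        have hne : PySem.Set.ofList vl ≠ [] := by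
          cases vl with
          | nil => exact absurd rfl hvl
          | cons a t =>
            intro h
            have : a ∈ PySem.Set.ofList (a :: t) := (PySem.Set.mem_ofList _ _).mpr (by simp)
            rw [h] at this; simp at this
        obtain ⟨v, hsing⟩ : ∃ v, PySem.Set.ofList vl = [v] := by
          rcases hs : PySem.Set.ofList vl with _ | ⟨v, _ | ⟨w, rest⟩⟩
          · exact absurd hs hne
          · exact ⟨v, rfl⟩
          · rw [hs] at hlen; simp at hlen
        rw [hsing]
        rw [PySem.List.foldl_congr_mem _ _
          (fun s c => if !(pvCGet c value_attrib == some v) then PySem.Set.add s (pvIdOf c) else s) _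
          (by intro s c _
              rw [pv_inner_loop]
              simp [pv_ofList_singleton_all _ hsing, pvIdOf])]
        rw [pv_foldl_add_filter]
        rfl
    · -- condition 'any'
      simp only [show ("any" == "all") = false from rfl, show ("any" == "any") = true from rfl]
      rw [PySem.List.foldl_congr_mem _ _
        (fun s c => if !(match pvCGet c value_attrib with
                         | some s => PySem.Set.contains (PySem.Set.ofList vl) s
                         | none => false) then PySem.Set.add s (pvIdOf c) else s) _
        (by intro s c _
            rw [pv_inner_loop]
            simp [pv_any_pred, pvIdOf])]
      rw [pv_foldl_add_filter]
      rfl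

-- ===== VERDICT (by name: the statement is the Claim_ definition above) =====
theorem get_candidate_discard_set_spec : Claim_equal_get_candidate_discard_set := by
  intro value candidate_list value_attrib _dom _pre
  unfold Spec_get_candidate_discard_set
  unfold get_candidate_discard_set get_candidate_discard_set_alt
  by_cases hv : value = []
  · simp [hv]
  · rw [if_neg hv, if_neg hv]
    by_cases hall : (PySem.Dict.mk value).contains "all"
    · simp only [hall, if_pos]
      exact pv_branch _ _ _ "all" (Or.inl rfl)
    · simp only [hall, Bool.false_eq_true, if_false]
      by_cases hany : (PySem.Dict.mk value).contains "any"
      · simp only [hany, if_pos]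
        exact pv_branch _ _ _ "any" (Or.inr rfl)
      · simp [hany]
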